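-- pv_equiv track=rewrite | github.com/dqzg12300/fridaUiTools | forms/SearchMemory.py | registerOrder
-- ===== SOURCE A (Python) =====
-- def registerOrder(context):
--     keys = list(context.keys())
--     preferred = ["pc", "sp", "fp", "lr", "x0", "x1", "x2", "x3", "x4", "x5", "x6", "x7", "x8", "x9",
--                  "x10", "x11", "x12", "x13", "x14", "x15", "x16", "x17", "x18", "x19", "x20",
--                  "x21", "x22", "x23", "x24", "x25", "x26", "x27", "x28",
--                  "r0", "r1", "r2", "r3", "r4", "r5", "r6", "r7", "r8", "r9", "r10", "r11", "r12"]
--     ordered = [key for key in preferred if key in context]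
--     ordered.extend(sorted([key for key in keys if key not in ordered]))
--     return ordered
-- ===== SOURCE B (Python) =====
-- def registerOrder(context):
--     preferred = ["pc", "sp", "fp", "lr", "x0", "x1", "x2", "x3", "x4", "x5", "x6", "x7", "x8", "x9",
--                  "x10", "x11", "x12", "x13", "x14", "x15", "x16", "x17", "x18", "x19", "x20",
--                  "x21", "x22", "x23", "x24", "x25", "x26", "x27", "x28",
--                  "r0", "r1", "r2", "r3", "r4", "r5", "r6", "r7", "r8", "r9", "r10", "r11", "r12"]
--     rank = {k: i for i, k in enumerate(preferred)}
--     return sorted(context.keys(), key=lambda k: (rank.get(k, len(preferred)), k))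
-- ===== Notes on version B (the rewrite author's own statement) =====
-- stated objective: simpler
-- what changed: Replaces the two-phase build (filter preferred keys present, then append the sorted remainder with an inner 'not in ordered' list scan) by one stable sort of the keys under a composite key (rank-in-preferred or sentinel len(preferred), then the key string).
import Mathlib
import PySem

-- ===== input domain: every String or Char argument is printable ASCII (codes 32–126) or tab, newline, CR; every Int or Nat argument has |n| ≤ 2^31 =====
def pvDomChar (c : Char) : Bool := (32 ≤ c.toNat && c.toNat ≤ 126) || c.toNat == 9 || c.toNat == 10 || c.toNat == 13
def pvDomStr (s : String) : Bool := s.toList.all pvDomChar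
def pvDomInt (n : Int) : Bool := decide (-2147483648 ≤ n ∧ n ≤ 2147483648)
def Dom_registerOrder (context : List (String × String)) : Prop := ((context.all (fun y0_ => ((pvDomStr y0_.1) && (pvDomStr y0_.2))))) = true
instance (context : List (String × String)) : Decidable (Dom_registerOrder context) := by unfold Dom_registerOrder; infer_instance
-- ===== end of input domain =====

-- B replaces A's two-phase build (filter preferred, then append the sorted remainder) by a
-- single stable sort under the composite key (rank-in-preferred or sentinel, key string); objective: simpler.

-- the literal `preferred` list both Python versions contain
def pvPreferred : List String :=
  ["pc", "sp", "fp", "lr", "x0", "x1", "x2", "x3", "x4", "x5", "x6", "x7", "x8", "x9",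
   "x10", "x11", "x12", "x13", "x14", "x15", "x16", "x17", "x18", "x19", "x20",
   "x21", "x22", "x23", "x24", "x25", "x26", "x27", "x28",
   "r0", "r1", "r2", "r3", "r4", "r5", "r6", "r7", "r8", "r9", "r10", "r11", "r12"]

-- ===== PORT A =====
def registerOrder (context : List (String × String)) : List String :=
  let d := PySem.Dict.ofList context
  let keys := d.keys
  let preferred := pvPreferred
  let ordered := preferred.filter (fun key => d.contains key)
  ordered ++ PySem.List.sorted (keys.filter (fun key => !(ordered.contains key))) (fun x => x) false

-- ===== PORT B =====
def registerOrder_alt (context : List (String × String)) : List String :=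
  let d := PySem.Dict.ofList context
  let preferred := pvPreferred
  let rank : PySem.Dict String Int :=
    PySem.Dict.ofList ((PySem.List.enumerate preferred).map (fun p => (p.2, p.1)))
  PySem.List.sorted2 d.keys (fun k => rank.getD k (PySem.List.len preferred)) (fun k => k) false

-- ===== PRECONDITION & SPEC =====
def Spec_registerOrder (context : List (String × String)) (out : List String) : Prop := out = registerOrder_alt context
instance (context : List (String × String)) (out : List String) : Decidable (Spec_registerOrder context out) := by unfold Spec_registerOrder; infer_instance

-- ===== CLAIM (what is proved, stated in full; the proofs are below) =====
def Claim_equal_registerOrder : Prop := ∀ (context : List (String × String)), Dom_registerOrder context → Spec_registerOrder context (registerOrder context)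

-- ===== LEMMAS AND PROOFS =====

-- sorted2 is sorted under the lexicographic pair key
theorem sorted2_eq_sorted_lex {α : Type} (xs : List α) (k1 : α → Int) (k2 : α → String) :
    PySem.List.sorted2 xs k1 k2 false =
      PySem.List.sorted xs (fun x => toLex (k1 x, k2 x)) false := by
  rw [PySem.List.sorted_eq_foldl_insertBy]
  show List.foldl _ [] xs = _
  congr 1
  funext acc x
  congr 1
  funext a b
  rcases lt_trichotomy (k1 a) (k1 b) with h | h | h
  · simp [Prod.Lex.lt_iff, h, asymm h, h.ne]
  · simp [Prod.Lex.lt_iff, h]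
  · simp [Prod.Lex.lt_iff, h, asymm h, h.ne']

def pvRank : PySem.Dict String Int :=
  PySem.Dict.ofList ((PySem.List.enumerate pvPreferred).map (fun p => (p.2, p.1)))

def pvRankOf (k : String) : Int := pvRank.getD k (PySem.List.len pvPreferred)

set_option maxRecDepth 8192 in
theorem rankOf_of_not_mem {k : String} (h : k ∉ pvPreferred) : pvRankOf k = 46 := by
  have hk : pvRank.keys = pvPreferred := by decide
  have : pvRank.get? k = none := by
    rw [PySem.Dict.get?_eq_none_iff_not_mem_keys, hk]; exact h
  simp [pvRankOf, PySem.Dict.getD, this]; decide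

set_option maxRecDepth 8192 in
theorem rank_pairwise : pvPreferred.Pairwise (fun a b => pvRankOf a < pvRankOf b) := by decide

set_option maxRecDepth 8192 in
theorem rankOf_lt_of_mem {k : String} (h : k ∈ pvPreferred) : pvRankOf k < 46 := by
  revert h
  have : ∀ k ∈ pvPreferred, pvRankOf k < 46 := by decide
  exact this k

set_option maxRecDepth 16384 in
theorem registerOrder_spec : Claim_equal_registerOrder := by
  intro context _
  unfold Spec_registerOrder registerOrder registerOrder_alt
  rw [sorted2_eq_sorted_lex]
  set d := PySem.Dict.ofList context with hd
  set keys := d.keys with hkeys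
  have hknd : keys.Nodup := PySem.Dict.nodup_keys_ofList context
  set O := pvPreferred.filter (fun key => d.contains key) with hO
  set F := keys.filter (fun key => !(O.contains key)) with hF
  set R := PySem.List.sorted F (fun x => x) false with hR
  -- membership facts
  have hOmem : ∀ {x}, x ∈ O → x ∈ pvPreferred ∧ x ∈ keys := by
    intro x hx
    rw [hO, List.mem_filter] at hx
    refine ⟨hx.1, ?_⟩
    have := hx.2
    rw [PySem.Dict.contains_eq_decide_mem_keys] at this
    simpa using this
  have hRperm : R.Perm F := PySem.List.sorted_perm F (fun x => x) false
  have hRmem : ∀ {x}, x ∈ R → x ∈ keys ∧ x ∉ O := by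
    intro x hx
    have hx' : x ∈ F := hRperm.mem_iff.mp hx
    rw [hF, List.mem_filter] at hx'
    exact ⟨hx'.1, by simpa using hx'.2⟩
  have hRnotpref : ∀ {x}, x ∈ R → x ∉ pvPreferred := by
    intro x hx hp
    obtain ⟨hk, hno⟩ := hRmem hx
    exact hno (by
      rw [hO, List.mem_filter]
      refine ⟨hp, ?_⟩
      rw [PySem.Dict.contains_eq_decide_mem_keys]
      simpa using hk)
  -- the permutation
  have hOnd : O.Nodup := List.Nodup.filter _ (by set_option maxRecDepth 8192 in decide)
  have hFnd : F.Nodup := List.Nodup.filter _ hknd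
  have hRnd : R.Nodup := hRperm.nodup_iff.mpr hFnd
  have hdisj : O.Disjoint R := by
    intro x hxO hxR
    exact (hRmem hxR).2 hxO
  have hperm : (O ++ R).Perm keys := by
    rw [List.perm_ext_iff_of_nodup (List.Nodup.append hOnd hRnd hdisj) hknd]
    intro a
    constructor
    · intro h
      rcases List.mem_append.mp h with h | h
      · exact (hOmem h).2
      · exact (hRmem h).1
    · intro h
      by_cases hc : a ∈ O
      · exact List.mem_append.mpr (Or.inl hc)
      · refine List.mem_append.mpr (Or.inr ?_)
        rw [hR]
        refine hRperm.mem_iff.mpr ?_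
        rw [hF, List.mem_filter]
        exact ⟨h, by simpa using hc⟩
  -- pairwise strict lex order on O ++ R
  have hkey : ∀ a b : String,
      (pvRankOf a < pvRankOf b ∨ pvRankOf a = pvRankOf b ∧ a < b) →
      toLex ((pvRankOf a : Int), a) < toLex ((pvRankOf b : Int), b) := by
    intro a b h
    exact Prod.Lex.lt_iff.mpr h
  have hOpw : O.Pairwise (fun a b => toLex ((pvRankOf a : Int), a) < toLex ((pvRankOf b : Int), b)) := by
    refine List.Pairwise.imp ?_ (List.Pairwise.filter _ rank_pairwise)
    intro a b h
    exact hkey a b (Or.inl h)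
  have hRle : R.Pairwise (fun a b : String => a ≤ b) := PySem.List.sorted_pairwise F (fun x => x)
  have hRlt : R.Pairwise (fun a b : String => a < b) := by
    refine List.Pairwise.imp ?_ (hRle.and hRnd)
    intro a b h
    exact lt_of_le_of_ne h.1 h.2
  have hRpw : R.Pairwise (fun a b => toLex ((pvRankOf a : Int), a) < toLex ((pvRankOf b : Int), b)) := by
    refine List.Pairwise.imp_of_mem ?_ hRlt
    intro a b ha hb h
    exact hkey a b (Or.inr ⟨by rw [rankOf_of_not_mem (hRnotpref ha), rankOf_of_not_mem (hRnotpref hb)], h⟩)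
  have hpw : (O ++ R).Pairwise (fun a b => toLex ((pvRankOf a : Int), a) < toLex ((pvRankOf b : Int), b)) := by
    rw [List.pairwise_append]
    refine ⟨hOpw, hRpw, ?_⟩
    intro a ha b hb
    refine hkey a b (Or.inl ?_)
    rw [rankOf_of_not_mem (hRnotpref hb)]
    exact rankOf_lt_of_mem (hOmem ha).1
  exact (PySem.List.sorted_eq_of_perm_of_pairwise_lt keys (O ++ R) _ hperm hpw).symm
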